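-- pv_equiv track=rewrite | github.com/kingstonv1/calico | python/cc-sp22/cipher.py | solve
-- ===== SOURCE A (Python) =====
-- def solve(cypher, steps):
--     for step in steps:
--         if 'C' in step:
--             pass
--         elif 'A' in step:
--             pass
--         else:
--             cypher.reverse()
--
--     return cypher
-- ===== SOURCE B (Python) =====
-- def solve(cypher, steps):
--     flips = sum(1 for step in steps if 'C' not in step and 'A' not in step)
--     if flips % 2 == 1:
--         cypher.reverse()
--     return cypher
-- ===== Notes on version B (the rewrite author's own statement) =====
-- stated objective: faster
-- what changed: Instead of reversing the list on every non-C/A step, B counts those steps once and reverses the list a single time iff the count is odd.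
import Mathlib
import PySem

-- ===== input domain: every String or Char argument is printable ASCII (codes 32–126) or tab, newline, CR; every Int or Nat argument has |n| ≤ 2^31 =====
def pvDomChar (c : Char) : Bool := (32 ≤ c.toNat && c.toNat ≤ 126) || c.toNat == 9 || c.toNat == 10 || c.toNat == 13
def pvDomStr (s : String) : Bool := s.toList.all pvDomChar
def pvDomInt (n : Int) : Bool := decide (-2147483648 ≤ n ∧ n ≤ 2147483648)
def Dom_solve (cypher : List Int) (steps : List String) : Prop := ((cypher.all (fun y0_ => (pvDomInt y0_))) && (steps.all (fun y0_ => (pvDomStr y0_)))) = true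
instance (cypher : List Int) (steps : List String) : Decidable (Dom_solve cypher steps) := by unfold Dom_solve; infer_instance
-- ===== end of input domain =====

-- B reverses once iff the number of non-C/A steps is odd, instead of reversing per step (timed faster).
-- A mutates `cypher` in place; B performs the same net mutation (one reverse iff odd parity); the theorems are about the return value.

-- ===== PORT A =====
def solve (cypher : List Int) (steps : List String) : List Int :=
  steps.foldl (fun acc step =>
    if PySem.Str.isIn "C" step then acc
    else if PySem.Str.isIn "A" step then acc
    else acc.reverse) cypher

-- ===== PORT B =====
def solve_alt (cypher : List Int) (steps : List String) : List Int :=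
  let flips := (steps.filter (fun step =>
    !(PySem.Str.isIn "C" step) && !(PySem.Str.isIn "A" step))).length
  if flips % 2 = 1 then cypher.reverse else cypher

-- ===== PRECONDITION & SPEC =====
def Spec_solve (cypher : List Int) (steps : List String) (out : List Int) : Prop := out = solve_alt cypher steps
instance (cypher : List Int) (steps : List String) (out : List Int) : Decidable (Spec_solve cypher steps out) := by unfold Spec_solve; infer_instance

-- ===== CLAIM (what is proved, stated in full; the proofs are below) =====
def Claim_equal_solve : Prop := ∀ (cypher : List Int) (steps : List String), Dom_solve cypher steps → Spec_solve cypher steps (solve cypher steps)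

-- ===== LEMMAS AND PROOFS =====

theorem solve_eq_alt (cypher : List Int) (steps : List String) :
    solve cypher steps = solve_alt cypher steps := by
  induction steps generalizing cypher with
  | nil => simp [solve, solve_alt]
  | cons s t ih =>
    simp only [solve, solve_alt, List.foldl_cons, List.filter_cons, PySem.Str.isIn_eq] at *
    by_cases hc : PySem.Chars.isIn "C".toList s.toList = true
    · have hb : (!PySem.Chars.isIn "C".toList s.toList &&
          !PySem.Chars.isIn "A".toList s.toList) = false := by
        simp only [hc, Bool.not_true, Bool.false_and]
      simp only [hc, hb, if_true, Bool.false_eq_true, if_false]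
      exact ih cypher
    · by_cases ha : PySem.Chars.isIn "A".toList s.toList = true
      · have hb : (!PySem.Chars.isIn "C".toList s.toList &&
            !PySem.Chars.isIn "A".toList s.toList) = false := by
          simp only [ha, Bool.not_true, Bool.and_false]
        simp only [hc, ha, hb, if_true, if_neg, Bool.false_eq_true, if_false]
        simpa using ih cypher
      · have hc' : PySem.Chars.isIn "C".toList s.toList = false := Bool.eq_false_iff.mpr hc
        have ha' : PySem.Chars.isIn "A".toList s.toList = false := Bool.eq_false_iff.mpr ha
        rw [if_neg hc, if_neg ha, ih cypher.reverse]
        simp only [hc', ha', Bool.not_false, Bool.and_self, List.reverse_reverse,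
          if_true, List.length_cons]
        rcases Nat.mod_two_eq_zero_or_one
            ((List.filter (fun step => !PySem.Chars.isIn "C".toList step.toList &&
              !PySem.Chars.isIn "A".toList step.toList) t).length) with h1 | h1
        · rw [if_neg (by omega), if_pos (by omega)]
        · rw [if_pos h1, if_neg (by omega)]

-- ===== VERDICT (by name: the statement is the Claim_ definition above) =====
theorem solve_spec : Claim_equal_solve := by
  intro cypher steps _
  unfold Spec_solve
  exact solve_eq_alt cypher steps
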